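-- pv_equiv track=rewrite | github.com/machinereading/BERT_WSD | src/dataio.py | lines2tsv
-- ===== SOURCE A (Python) =====
-- def lines2tsv(lines):
--     tsv = []
--     sent = []
--     for line in lines:
--         line = line.strip()
--
--         if line != '':
--             token = line.split('\t')
--             sent.append(token)
--         else:
--             tsv.append(sent)
--             sent = []
--     return tsv
-- ===== SOURCE B (Python) =====
-- def lines2tsv(lines):
--     lines = list(lines)
--     blanks = [i for i, l in enumerate(lines) if l.strip() == '']
--     tsv = []
--     prev = 0
--     for p in blanks:
--         tsv.append([l.strip().split('\t') for l in lines[prev:p]])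
--         prev = p + 1
--     return tsv
-- ===== Notes on version B (the rewrite author's own statement) =====
-- stated objective: alternative
-- what changed: Replaces A's single stateful accumulator pass (append tokens, flush on blank) by a two-phase traversal: first compute the list of blank-line indices, then build each sentence by slicing the materialized line list between consecutive delimiters (trailing content after the last delimiter is never sliced, matching A).
import Mathlib
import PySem

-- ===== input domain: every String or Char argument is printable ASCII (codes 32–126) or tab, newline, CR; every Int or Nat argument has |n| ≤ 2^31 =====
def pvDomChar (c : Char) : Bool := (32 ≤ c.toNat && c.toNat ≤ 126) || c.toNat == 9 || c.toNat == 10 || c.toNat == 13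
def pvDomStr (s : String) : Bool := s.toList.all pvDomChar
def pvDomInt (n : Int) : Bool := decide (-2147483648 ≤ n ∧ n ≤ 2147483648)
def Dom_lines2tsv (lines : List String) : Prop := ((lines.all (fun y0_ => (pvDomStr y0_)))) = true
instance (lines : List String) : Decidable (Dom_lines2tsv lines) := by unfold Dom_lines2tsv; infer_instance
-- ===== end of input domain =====

-- ===== PORT A =====
-- literal port of A: one stateful pass, state = (tsv, sent); flush sent on a blank line
def lines2tsv (lines : List String) : List (List (List String)) :=
  (lines.foldl (fun (st : List (List (List String)) × List (List String)) line =>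
      let line := PySem.Str.strip line
      if line ≠ "" then (st.1, st.2 ++ [(PySem.Str.split? line "\t").getD []])
      else (st.1 ++ [st.2], [])) ([], [])).1

-- ===== PORT B =====
-- B: two-phase — collect blank-line indices, then slice the line list between consecutive delimiters
def lines2tsv_alt (lines : List String) : List (List (List String)) :=
  let blanks : List Int :=
    ((PySem.List.enumerate lines 0).filter (fun il => PySem.Str.strip il.2 == "")).map (·.1)
  (blanks.foldl (fun (st : List (List (List String)) × Int) p =>
      (st.1 ++ [(PySem.List.slice lines (some st.2) (some p)).map
                  (fun l => (PySem.Str.split? (PySem.Str.strip l) "\t").getD [])], p + 1))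
    ([], 0)).1

-- ===== PRECONDITION & SPEC =====
def Spec_lines2tsv (lines : List String) (out : List (List (List String))) : Prop := out = lines2tsv_alt lines
instance (lines : List String) (out : List (List (List String))) : Decidable (Spec_lines2tsv lines out) := by unfold Spec_lines2tsv; infer_instance

-- ===== CLAIM (what is proved, stated in full; the proofs are below) =====
def Claim_equal_lines2tsv : Prop := ∀ (lines : List String), Dom_lines2tsv lines → Spec_lines2tsv lines (lines2tsv lines)

-- ===== LEMMAS AND PROOFS =====

-- tokens of one line
def pvTok (l : String) : List String := (PySem.Str.split? (PySem.Str.strip l) "\t").getD []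

-- reference recursion: what both programs compute (sent = tokens accumulated so far)
def pvGo (sent : List (List String)) : List String → List (List (List String))
  | [] => []
  | l :: ls => if PySem.Str.strip l == "" then sent :: pvGo [] ls else pvGo (sent ++ [pvTok l]) ls

def pvStepA (st : List (List (List String)) × List (List String)) (line : String) :
    List (List (List String)) × List (List String) :=
  let line := PySem.Str.strip line
  if line ≠ "" then (st.1, st.2 ++ [(PySem.Str.split? line "\t").getD []])
  else (st.1 ++ [st.2], [])

def pvStepB (lines : List String) (st : List (List (List String)) × Int) (p : Int) :
    List (List (List String)) × Int :=
  (st.1 ++ [(PySem.List.slice lines (some st.2) (some p)).map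
              (fun l => (PySem.Str.split? (PySem.Str.strip l) "\t").getD [])], p + 1)

theorem lines2tsv_eq_stepA (lines : List String) :
    lines2tsv lines = (lines.foldl pvStepA ([], [])).1 := rfl

theorem lines2tsv_alt_eq_stepB (lines : List String) :
    lines2tsv_alt lines =
      ((((PySem.List.enumerate lines 0).filter (fun il => PySem.Str.strip il.2 == "")).map
          (·.1)).foldl (pvStepB lines) ([], 0)).1 := rfl

theorem foldA_eq_go (lines : List String) :
    ∀ (tsv : List (List (List String))) (sent : List (List String)),
    (lines.foldl pvStepA (tsv, sent)).1 = tsv ++ pvGo sent lines := by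
  induction lines with
  | nil => intro tsv sent; simp [pvGo]
  | cons l ls ih =>
    intro tsv sent
    rw [List.foldl_cons]
    by_cases h : PySem.Str.strip l = ""
    · have hs : pvStepA (tsv, sent) l = (tsv ++ [sent], []) := by simp [pvStepA, h]
      rw [hs, ih]
      simp [pvGo, h]
    · have hs : pvStepA (tsv, sent) l = (tsv, sent ++ [pvTok l]) := by
        simp [pvStepA, pvTok, h]
      rw [hs, ih]
      simp [pvGo, h]

theorem foldB_eq_go (lines : List String) :
    ∀ (suffix mid : List String) (prev : Nat) (acc : List (List (List String))),
    lines.drop prev = mid ++ suffix →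
    ((((PySem.List.enumerate suffix ((prev : Int) + mid.length)).filter
          (fun il => PySem.Str.strip il.2 == "")).map (·.1)).foldl
      (pvStepB lines) (acc, (prev : Int))).1 = acc ++ pvGo (mid.map pvTok) suffix := by
  intro suffix
  induction suffix with
  | nil => intro mid prev acc _; simp [pvGo, PySem.List.enumerate]
  | cons l ls ih =>
    intro mid prev acc h
    rw [PySem.List.enumerate_cons]
    by_cases hb : PySem.Str.strip l = ""
    · have hslice : PySem.List.slice lines (some ((prev : Nat) : Int))
          (some ((prev : Int) + ((mid.length : Nat) : Int))) = mid := by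
        rw [PySem.List.slice_natCast_add lines prev mid.length, h, List.take_left]
      have hdrop : lines.drop (prev + mid.length + 1) = ls := by
        have h2 : (lines.drop prev).drop (mid.length + 1) = ls := by
          rw [h]; simp [List.drop_append]
        rw [← h2, List.drop_drop]; ring_nf
      have hrec := ih [] (prev + mid.length + 1) (acc ++ [mid.map pvTok]) (by simpa using hdrop)
      simp only [List.length_nil, Nat.cast_zero, add_zero] at hrec
      have hstep : pvStepB lines (acc, (prev : Int)) ((prev : Int) + mid.length)
          = (acc ++ [mid.map pvTok], (prev : Int) + mid.length + 1) := by
        simp [pvStepB, hslice, pvTok]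
      simp only [List.filter_cons, hb, beq_self_eq_true, if_pos, List.map_cons,
        List.foldl_cons, hstep]
      rw [show (prev : Int) + (mid.length : Int) + 1 = ((prev + mid.length + 1 : Nat) : Int) by
        push_cast; ring]
      rw [hrec]
      simp [pvGo, hb, List.append_assoc]
    · have hbne : (PySem.Str.strip l == "") = false := by simp [hb]
      have hrec := ih (mid ++ [l]) prev acc (by rw [h]; simp)
      simp only [List.filter_cons, hbne, Bool.false_eq_true, if_neg, not_false_eq_true,
        List.length_append, List.length_cons, List.length_nil] at hrec ⊢
      rw [show (prev : Int) + (mid.length : Int) + 1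
            = (prev : Int) + ((mid.length + (0 + 1) : Nat) : Int) by push_cast; ring]
      rw [hrec]
      simp [pvGo, hb, pvTok]

-- ===== VERDICT (by name: the statement is the Claim_ definition above) =====
theorem lines2tsv_spec : Claim_equal_lines2tsv := by
  intro lines _
  show lines2tsv lines = lines2tsv_alt lines
  rw [lines2tsv_eq_stepA, lines2tsv_alt_eq_stepB, foldA_eq_go lines [] []]
  have hB := foldB_eq_go lines lines [] 0 [] (by simp)
  simp only [List.length_nil, Nat.cast_zero, add_zero, List.map_nil, List.nil_append] at hB ⊢
  exact hB.symm
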